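-- pv_equiv track=rewrite | github.com/nmarchand73/mp3tomidi | motif_extractor.py | _reconstruct_motif_from_pattern
-- ===== SOURCE A (Python) =====
-- from typing import List, Tuple, Optional
--
-- def _reconstruct_motif_from_pattern(note_sequence: List[Tuple[int, int, int]],
--                                     intervals: Tuple, rhythm: Tuple,
--                                     start_pitch: int) -> List[Tuple[int, int, int]]:
--     """Reconstruct the motif notes from interval and rhythm pattern."""
--     # Find first occurrence of this pattern
--     for i in range(len(note_sequence) - len(intervals)):
--         segment = note_sequence[i:i + len(intervals) + 1]
--         pitches = [n[0] for n in segment]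
--
--         if pitches[0] == start_pitch:
--             # Check if intervals match
--             seg_intervals = tuple(pitches[j+1] - pitches[j] for j in range(len(pitches) - 1))
--             if seg_intervals == intervals:
--                 return segment
--
--     # Fallback: reconstruct from pattern
--     pitches = [start_pitch]
--     for interval in intervals:
--         pitches.append(pitches[-1] + interval)
--
--     # Use rhythm to create note data
--     notes = []
--     for i, pitch in enumerate(pitches):
--         velocity = 80  # Default velocity
--         duration = rhythm[i] if i < len(rhythm) else rhythm[0]
--         notes.append((pitch, velocity, duration * 100))  # Scale duration
--
--     return notes
-- ===== SOURCE B (Python) =====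
-- def _reconstruct_motif_from_pattern(note_sequence, intervals, rhythm, start_pitch):
--     """Reconstruct the motif notes from interval and rhythm pattern.
--
--     Computes the absolute target pitch line once, then skip-scans with
--     list.index for candidate start positions instead of re-deriving the
--     interval tuple of every window."""
--     target = [start_pitch]
--     last = start_pitch
--     for iv in intervals:
--         last += iv
--         target.append(last)
--     L = len(target)
--     pitches = [n[0] for n in note_sequence]
--     pos = 0
--     while True:
--         try:
--             pos = pitches.index(start_pitch, pos)
--         except ValueError:
--             break
--         if pitches[pos:pos + L] == target:
--             return note_sequence[pos:pos + L]
--         pos += 1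
--     return [(p, 80, (rhythm[i] if i < len(rhythm) else rhythm[0]) * 100)
--             for i, p in enumerate(target)]
-- ===== Notes on version B (the rewrite author's own statement) =====
-- stated objective: alternative
-- what changed: B precomputes the absolute target pitch line (cumulative sums of intervals) once and skip-scans the pitch list with list.index for candidate start pitches, comparing each candidate window to the fixed target, instead of slicing every window and rebuilding its interval tuple.
import Mathlib
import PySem

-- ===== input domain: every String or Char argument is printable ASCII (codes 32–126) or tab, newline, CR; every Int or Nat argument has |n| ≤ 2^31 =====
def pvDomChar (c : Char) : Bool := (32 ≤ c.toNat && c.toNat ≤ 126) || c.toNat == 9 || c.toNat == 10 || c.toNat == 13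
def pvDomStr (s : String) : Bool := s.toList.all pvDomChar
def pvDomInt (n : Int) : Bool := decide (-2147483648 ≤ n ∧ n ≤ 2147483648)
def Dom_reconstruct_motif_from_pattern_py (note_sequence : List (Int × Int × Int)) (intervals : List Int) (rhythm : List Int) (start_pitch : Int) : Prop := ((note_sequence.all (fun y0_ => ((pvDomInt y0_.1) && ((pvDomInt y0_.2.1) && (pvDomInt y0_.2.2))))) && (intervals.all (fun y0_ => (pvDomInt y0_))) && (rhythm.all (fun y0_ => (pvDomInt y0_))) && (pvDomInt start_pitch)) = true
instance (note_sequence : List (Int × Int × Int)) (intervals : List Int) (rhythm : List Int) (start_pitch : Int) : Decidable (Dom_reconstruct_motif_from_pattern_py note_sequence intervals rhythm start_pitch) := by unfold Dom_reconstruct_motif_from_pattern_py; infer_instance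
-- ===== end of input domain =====

-- B precomputes the absolute target pitch line once and skip-scans for candidate start pitches
-- instead of rebuilding every window's interval tuple (objective: alternative algorithm, same worst-case cost).

-- ===== PORT A =====
-- seg_intervals = tuple(pitches[j+1] - pitches[j] for j in range(len(pitches) - 1))
def pvSegIntervals (pitches : List Int) : List Int :=
  (PySem.List.pyRange 0 ((pitches.length : Int) - 1) 1).map
    (fun j => PySem.List.pyGetD pitches (j + 1) 0 - PySem.List.pyGetD pitches j 0)

-- the 'for i in range(len(note_sequence) - len(intervals))' loop with its early return
def pvA_find (ns : List (Int × Int × Int)) (intervals : List Int) (sp : Int) :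
    List Int → Option (List (Int × Int × Int))
  | [] => none
  | i :: rest =>
    let segment := PySem.List.slice ns (some i) (some (i + intervals.length + 1))
    let pitches := segment.map (fun n => n.1)
    if PySem.List.pyGetD pitches 0 0 = sp then
      if pvSegIntervals pitches = intervals then some segment
      else pvA_find ns intervals sp rest
    else pvA_find ns intervals sp rest

def reconstruct_motif_from_pattern_py (note_sequence : List (Int × Int × Int)) (intervals : List Int) (rhythm : List Int) (start_pitch : Int) : List (Int × Int × Int) :=
  match pvA_find note_sequence intervals start_pitch
      (PySem.List.pyRange 0 ((note_sequence.length : Int) - (intervals.length : Int)) 1) with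
  | some segment => segment
  | none =>
    -- fallback: pitches = [start_pitch]; for interval in intervals: pitches.append(pitches[-1] + interval)
    let pitches := intervals.foldl
      (fun acc interval => acc ++ [PySem.List.pyGetD acc (-1) 0 + interval]) [start_pitch]
    -- for i, pitch in enumerate(pitches): notes.append((pitch, 80, duration * 100))
    (PySem.List.enumerate pitches 0).foldl
      (fun notes ip =>
        notes ++ [(ip.2, 80,
          (if ip.1 < (rhythm.length : Int) then PySem.List.pyGetD rhythm ip.1 0
           else PySem.List.pyGetD rhythm 0 0) * 100)]) []

-- ===== PORT B =====
-- the 'while True: pos = pitches.index(start_pitch, pos) …' skip-scan: index(start_pitch, pos)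
-- advances past every position whose pitch ≠ start_pitch, rendered as suffix recursion;
-- pitches[pos:pos+L] == target is the map-fst of the L-window compared with target.
def pvB_search (sp : Int) (target : List Int) :
    List (Int × Int × Int) → Option (List (Int × Int × Int))
  | [] => none
  | hd :: tl =>
    if hd.1 = sp then
      if ((hd :: tl).take target.length).map (fun n => n.1) = target
      then some ((hd :: tl).take target.length)
      else pvB_search sp target tl
    else pvB_search sp target tl

def reconstruct_motif_from_pattern_py_alt (note_sequence : List (Int × Int × Int)) (intervals : List Int) (rhythm : List Int) (start_pitch : Int) : List (Int × Int × Int) :=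
  -- target = [start_pitch]; last = start_pitch; for iv in intervals: last += iv; target.append(last)
  let target := (intervals.foldl
      (fun st iv => (st.1 ++ [st.2 + iv], st.2 + iv)) ([start_pitch], start_pitch)).1
  match pvB_search start_pitch target note_sequence with
  | some segment => segment
  | none =>
    (PySem.List.enumerate target 0).map
      (fun ip => (ip.2, 80,
        (if ip.1 < (rhythm.length : Int) then PySem.List.pyGetD rhythm ip.1 0
         else PySem.List.pyGetD rhythm 0 0) * 100))

-- ===== PRECONDITION & SPEC =====
-- spec-side description of the target pitch line (start_pitch followed by cumulative intervals)
def pvTarget (sp : Int) : List Int → List Int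
  | [] => [sp]
  | iv :: t => sp :: pvTarget (sp + iv) t

-- Pre_ excludes exactly the inputs on which Python A raises IndexError: rhythm is empty and no
-- window of note_sequence realises the target pitch line, so the fallback evaluates rhythm[0].
def Pre_reconstruct_motif_from_pattern_py (note_sequence : List (Int × Int × Int)) (intervals : List Int) (rhythm : List Int) (start_pitch : Int) : Prop :=
  rhythm ≠ [] ∨ ∃ i < note_sequence.length + 1,
    ((note_sequence.drop i).take (intervals.length + 1)).map (fun n => n.1) =
      pvTarget start_pitch intervals
instance (note_sequence : List (Int × Int × Int)) (intervals : List Int) (rhythm : List Int) (start_pitch : Int) : Decidable (Pre_reconstruct_motif_from_pattern_py note_sequence intervals rhythm start_pitch) := by unfold Pre_reconstruct_motif_from_pattern_py; infer_instance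

def pvWitness_reconstruct_motif_from_pattern_py : (List (Int × Int × Int)) × List Int × List Int × Int :=
  ([(60, 80, 100)], [2], [1, 1], 60)

def Spec_reconstruct_motif_from_pattern_py (note_sequence : List (Int × Int × Int)) (intervals : List Int) (rhythm : List Int) (start_pitch : Int) (out : List (Int × Int × Int)) : Prop := out = reconstruct_motif_from_pattern_py_alt note_sequence intervals rhythm start_pitch
instance (note_sequence : List (Int × Int × Int)) (intervals : List Int) (rhythm : List Int) (start_pitch : Int) (out : List (Int × Int × Int)) : Decidable (Spec_reconstruct_motif_from_pattern_py note_sequence intervals rhythm start_pitch out) := by unfold Spec_reconstruct_motif_from_pattern_py; infer_instance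

-- ===== CLAIM (what is proved, stated in full; the proofs are below) =====
def Claim_equal_reconstruct_motif_from_pattern_py : Prop := ∀ (note_sequence : List (Int × Int × Int)) (intervals : List Int) (rhythm : List Int) (start_pitch : Int), Dom_reconstruct_motif_from_pattern_py note_sequence intervals rhythm start_pitch → Pre_reconstruct_motif_from_pattern_py note_sequence intervals rhythm start_pitch → Spec_reconstruct_motif_from_pattern_py note_sequence intervals rhythm start_pitch (reconstruct_motif_from_pattern_py note_sequence intervals rhythm start_pitch)

-- ===== LEMMAS AND PROOFS =====

theorem pvWitness_ok :
    Dom_reconstruct_motif_from_pattern_py (pvWitness_reconstruct_motif_from_pattern_py.1) (pvWitness_reconstruct_motif_from_pattern_py.2.1) (pvWitness_reconstruct_motif_from_pattern_py.2.2.1) (pvWitness_reconstruct_motif_from_pattern_py.2.2.2) ∧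
    Pre_reconstruct_motif_from_pattern_py (pvWitness_reconstruct_motif_from_pattern_py.1) (pvWitness_reconstruct_motif_from_pattern_py.2.1) (pvWitness_reconstruct_motif_from_pattern_py.2.2.1) (pvWitness_reconstruct_motif_from_pattern_py.2.2.2) := by
  constructor <;> decide

theorem pvSegIntervals_eq_zipWith (l : List Int) :
    pvSegIntervals l = List.zipWith (fun x y => y - x) l l.tail := by
  apply List.ext_getElem
  · simp [pvSegIntervals, PySem.List.length_pyRange_one]
  · intro k h1 h2
    simp only [pvSegIntervals, List.getElem_map, PySem.List.getElem_pyRange_one]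
    have hk : k < l.length - 1 := by
      simpa [pvSegIntervals, PySem.List.length_pyRange_one] using h1
    have e1 : (0 : Int) + k + 1 = ((k + 1 : Nat) : Int) := by push_cast; ring
    have e2 : (0 : Int) + k = ((k : Nat) : Int) := by omega
    rw [e1, e2, PySem.List.pyGetD_natCast, PySem.List.pyGetD_natCast]
    rw [List.getElem_zipWith]
    have hkt : k < l.tail.length := by simp; omega
    have ht : l.tail[k]'hkt = l[k + 1]'(by omega) := by
      rw [List.getElem_tail]
    rw [ht]
    rw [List.getD_eq_getElem _ _ (by omega), List.getD_eq_getElem _ _ (by omega)]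
theorem pvTarget_length (ints : List Int) (sp : Int) :
    (pvTarget sp ints).length = ints.length + 1 := by
  induction ints generalizing sp with
  | nil => rfl
  | cons iv t ih => simp [pvTarget, ih]

theorem pvCond_iff (ints : List Int) (pitches : List Int) (sp : Int)
    (hlen : pitches.length = ints.length + 1) :
    (pitches.getD 0 0 = sp ∧ List.zipWith (fun x y => y - x) pitches pitches.tail = ints)
      ↔ pitches = pvTarget sp ints := by
  induction ints generalizing pitches sp with
  | nil =>
    match pitches, hlen with
    | [p], _ => simp [pvTarget]
  | cons iv t ih =>
    match pitches, hlen with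
    | p0 :: p1 :: rest, hlen =>
      have h2 : (p1 :: rest).length = t.length + 1 := by simpa using hlen
      simp only [List.zipWith_cons_cons, List.tail_cons, List.getD_cons_zero, pvTarget,
        List.cons.injEq]
      constructor
      · rintro ⟨h0, h, hz⟩
        subst h0
        refine ⟨rfl, ?_⟩
        rw [← ih (p1 :: rest) (p0 + iv) h2]
        exact ⟨by simp; omega, hz⟩
      · rintro ⟨h0, hrest⟩
        subst h0
        have := (ih (p1 :: rest) (p0 + iv) h2).mpr hrest
        simp at this
        exact ⟨rfl, by omega, this.2⟩
theorem pvTargetFold_eq (ints : List Int) (pre : List Int) (sp : Int) :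
    (ints.foldl (fun st iv => (st.1 ++ [st.2 + iv], st.2 + iv)) (pre ++ [sp], sp)).1
      = pre ++ pvTarget sp ints := by
  induction ints generalizing pre sp with
  | nil => simp [pvTarget]
  | cons iv t ih =>
    simp only [List.foldl_cons, pvTarget]
    rw [show pre ++ [sp] ++ [sp + iv] = (pre ++ [sp]) ++ [sp + iv] by simp, ih]
    simp

theorem pvPitchesFold_eq (ints : List Int) (pre : List Int) (sp : Int) :
    ints.foldl (fun acc iv => acc ++ [PySem.List.pyGetD acc (-1) 0 + iv]) (pre ++ [sp])
      = pre ++ pvTarget sp ints := by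
  induction ints generalizing pre sp with
  | nil => simp [pvTarget]
  | cons iv t ih =>
    simp only [List.foldl_cons, PySem.List.pyGetD_neg_one_append_singleton]
    rw [show pre ++ [sp] ++ [sp + iv] = (pre ++ [sp]) ++ [sp + iv] by simp, ih]
    simp [pvTarget]

theorem pvB_search_short (sp : Int) (target : List Int) :
    ∀ (xs : List (Int × Int × Int)),
    xs.length < target.length → pvB_search sp target xs = none := by
  intro xs
  induction xs with
  | nil => intro _; rfl
  | cons hd tl ih =>
    intro h
    have hlt : tl.length + 1 < target.length := by simpa using h
    have hne : ((hd :: tl).take target.length).map (fun n => n.1) ≠ target := by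
      intro he
      have := congrArg List.length he
      simp [List.length_take] at this
      omega
    simp only [pvB_search, hne, if_false]
    have : pvB_search sp target tl = none := ih (by simp at h ⊢; omega)
    split_ifs <;> simp [this]
theorem pvLoop_eq (ns : List (Int × Int × Int)) (ints : List Int) (sp : Int) :
    ∀ (k s : Nat), (s : Int) + k = (ns.length : Int) - ints.length →
    pvA_find ns ints sp (PySem.List.pyRange s ((ns.length : Int) - (ints.length : Int)) 1)
      = pvB_search sp (pvTarget sp ints) (ns.drop s) := by
  intro k
  induction k with
  | zero =>
    intro s hs
    rw [PySem.List.pyRange_one_eq_nil (by omega)]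
    rw [pvB_search_short sp _ _ (by rw [pvTarget_length]; simp; omega)]
    rfl
  | succ k ih =>
    intro s hs
    rw [PySem.List.pyRange_one_cons (by omega)]
    have hsn : s < ns.length := by omega
    obtain ⟨hd, tl, hdt⟩ := List.exists_cons_of_ne_nil
      (show ns.drop s ≠ [] by
        intro he; have := congrArg List.length he; simp at this; omega)
    have hseg : PySem.List.slice ns (some (s : Int)) (some ((s : Int) + (ints.length : Int) + 1))
        = (ns.drop s).take (ints.length + 1) := by
      rw [show (s : Int) + (ints.length : Int) + 1 = (s : Int) + ((ints.length + 1 : Nat) : Int) by push_cast; ring]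
      exact PySem.List.slice_natCast_add ns s (ints.length + 1)
    have htllen : tl.length + 1 = ns.length - s := by
      have := congrArg List.length hdt; simp at this; omega
    have hplen : (((ns.drop s).take (ints.length + 1)).map (fun n => n.1)).length
        = ints.length + 1 := by
      simp [List.length_take]; omega
    have hget0 : PySem.List.pyGetD (((ns.drop s).take (ints.length + 1)).map (fun n => n.1)) 0 0
        = hd.1 := by
      rw [hdt, List.take_succ_cons, List.map_cons, PySem.List.pyGetD_zero_cons]
    have htail : ns.drop (s + 1) = tl := by
      rw [← List.tail_drop, hdt]; rfl
    have hget0' : (((ns.drop s).take (ints.length + 1)).map (fun n => n.1)).getD 0 0 = hd.1 := by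
      rw [hdt, List.take_succ_cons, List.map_cons, List.getD_cons_zero]
    have hcond := pvCond_iff ints (((ns.drop s).take (ints.length + 1)).map (fun n => n.1)) sp hplen
    rw [hget0'] at hcond
    have hih := ih (s + 1) (by push_cast; omega)
    rw [show ((s + 1 : Nat) : Int) = (s : Int) + 1 by push_cast; ring] at hih
    rw [htail] at hih
    simp only [pvA_find, hseg, hget0, pvSegIntervals_eq_zipWith]
    conv_rhs => rw [hdt]
    simp only [pvB_search, pvTarget_length]
    by_cases hsp : hd.1 = sp
    · simp only [hsp, if_true]
      by_cases hm : (((ns.drop s).take (ints.length + 1)).map (fun n => n.1)) = pvTarget sp ints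
      · have hz := (hcond.mpr hm).2
        rw [← hdt]
        rw [hm] at hz
        simp only [hm, hz, if_true]
      · have hz : ¬ (List.zipWith (fun x y => y - x)
            (((ns.drop s).take (ints.length + 1)).map (fun n => n.1))
            (((ns.drop s).take (ints.length + 1)).map (fun n => n.1)).tail = ints) := by
          intro hzz
          exact hm (hcond.mp ⟨hsp ▸ rfl, hzz⟩)
        rw [← hdt]
        simp only [hm, hz, if_false]
        exact hih
    · simp only [hsp, if_false]
      exact hih
theorem pvTargetFold_nil (ints : List Int) (sp : Int) :
    (ints.foldl (fun st iv => (st.1 ++ [st.2 + iv], st.2 + iv)) ([sp], sp)).1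
      = pvTarget sp ints := by
  simpa using pvTargetFold_eq ints [] sp

theorem pvPitchesFold_nil (ints : List Int) (sp : Int) :
    ints.foldl (fun acc iv => acc ++ [PySem.List.pyGetD acc (-1) 0 + iv]) [sp]
      = pvTarget sp ints := by
  simpa using pvPitchesFold_eq ints [] sp

theorem pvFind_eq (ns : List (Int × Int × Int)) (ints : List Int) (sp : Int) :
    pvA_find ns ints sp (PySem.List.pyRange 0 ((ns.length : Int) - (ints.length : Int)) 1)
      = pvB_search sp (pvTarget sp ints) ns := by
  by_cases hnm : ints.length ≤ ns.length
  · have h := pvLoop_eq ns ints sp (ns.length - ints.length) 0 (by push_cast; omega)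
    simpa using h
  · rw [PySem.List.pyRange_one_eq_nil (by omega)]
    rw [pvB_search_short sp _ _ (by rw [pvTarget_length]; omega)]
    rfl

-- ===== VERDICT (by name: the statement is the Claim_ definition above) =====
theorem reconstruct_motif_from_pattern_py_spec : Claim_equal_reconstruct_motif_from_pattern_py := by
  intro ns ints rh sp _ _
  show reconstruct_motif_from_pattern_py ns ints rh sp
      = reconstruct_motif_from_pattern_py_alt ns ints rh sp
  simp only [reconstruct_motif_from_pattern_py, reconstruct_motif_from_pattern_py_alt]
  rw [pvTargetFold_nil, pvPitchesFold_nil, pvFind_eq]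
  cases pvB_search sp (pvTarget sp ints) ns with
  | some seg => rfl
  | none =>
    simp only []
    rw [PySem.List.foldl_append_singleton_eq_map
      (f := fun ip : Int × Int => ((ip.2 : Int), (80 : Int),
        (if ip.1 < (rh.length : Int) then PySem.List.pyGetD rh ip.1 0
         else PySem.List.pyGetD rh 0 0) * 100))]
    simp
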